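-- pv_equiv track=rewrite | github.com/alexrpagan/doit | www/doitweb/doit/views.py | pretty_order_entity_attributes
-- ===== SOURCE A (Python) =====
-- def pretty_order_entity_attributes(e1, e2):
--     attr = {}
--     for name, value in e1['data'].items():
--         attr[name] = {'name': name, 'value1': value}
--         attr[name]['value2'] = e2['data'][name] if name in e2['data'] else ''
--     for name, value in e2['data'].items():
--         if name not in attr:
--             attr[name] = {'name': name, 'value2': value, 'value1': ''}
--
--     def sort_order_key(a):
--         score = 0
--         if a['value1'] is not None and a['value1'] != '' and a['value1'] != 'None':
--             score += 1
--         if a['value2'] is not None and a['value2'] != '' and a['value2'] != 'None':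
--             score += 1
--         return score * -1
--     return sorted(attr.values(), key=sort_order_key)
-- ===== SOURCE B (Python) =====
-- def pretty_order_entity_attributes(e1, e2):
--     # Counting buckets instead of a comparison sort: stable 3-bucket concatenation.
--     d1, d2 = e1['data'], e2['data']
--
--     def present(v):
--         return v is not None and v != '' and v != 'None'
--
--     buckets = ([], [], [])
--     for name, v1 in d1.items():
--         v2 = d2.get(name, '')
--         buckets[present(v1) + present(v2)].append(
--             {'name': name, 'value1': v1, 'value2': v2})
--     for name, v2 in d2.items():
--         if name not in d1:
--             buckets[present(v2)].append(
--                 {'name': name, 'value2': v2, 'value1': ''})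
--     return buckets[2] + buckets[1] + buckets[0]
-- ===== Notes on version B (the rewrite author's own statement) =====
-- stated objective: alternative
-- what changed: Replaces the comparison sort by key with a single-pass three-way bucketing (scores 2/1/0) over the ordered key union, concatenating the buckets; the attr dict and sorted() disappear.
import Mathlib
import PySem

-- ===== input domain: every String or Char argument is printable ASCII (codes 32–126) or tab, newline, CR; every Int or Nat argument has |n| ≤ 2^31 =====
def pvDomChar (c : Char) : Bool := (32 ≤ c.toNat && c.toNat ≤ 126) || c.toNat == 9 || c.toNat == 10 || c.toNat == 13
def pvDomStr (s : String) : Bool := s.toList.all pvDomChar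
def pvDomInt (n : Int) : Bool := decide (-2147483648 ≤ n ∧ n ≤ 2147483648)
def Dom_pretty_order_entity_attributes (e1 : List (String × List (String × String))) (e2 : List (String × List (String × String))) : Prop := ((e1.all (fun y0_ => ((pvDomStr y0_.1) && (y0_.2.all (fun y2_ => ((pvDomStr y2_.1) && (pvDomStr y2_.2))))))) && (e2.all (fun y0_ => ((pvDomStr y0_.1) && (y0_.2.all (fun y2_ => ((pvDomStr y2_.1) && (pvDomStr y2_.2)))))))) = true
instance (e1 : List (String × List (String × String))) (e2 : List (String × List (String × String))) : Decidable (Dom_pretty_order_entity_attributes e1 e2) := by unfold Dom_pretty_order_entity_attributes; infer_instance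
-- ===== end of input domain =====

-- B replaces the comparison sort with stable three-way bucketing by score; same return value on Pre_.

-- ===== PORT A =====
-- Python's nested `sort_order_key` helper (score * -1); values are Strings here, so `is not None` is always true.
def pvSortKey (a : PySem.Dict String String) : Int :=
  ((if a.getD "value1" "" ≠ "" ∧ a.getD "value1" "" ≠ "None" then (1 : Int) else 0) +
   (if a.getD "value2" "" ≠ "" ∧ a.getD "value2" "" ≠ "None" then (1 : Int) else 0)) * -1

def pretty_order_entity_attributes (e1 : List (String × List (String × String))) (e2 : List (String × List (String × String))) : List (List (String × String)) :=
  -- e1['data'] / e2['data']: KeyError when absent, excluded by Pre_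
  let d1 := PySem.Dict.mk ((PySem.Dict.mk e1).getD "data" [])
  let d2 := PySem.Dict.mk ((PySem.Dict.mk e2).getD "data" [])
  -- attr[name] = {'name':…,'value1':…}; attr[name]['value2'] = … — written as one insert of the 3-key dict
  let attr := d1.items.foldl (fun (attr : PySem.Dict String (PySem.Dict String String)) p =>
      attr.insert p.1 ((PySem.Dict.mk [("name", p.1), ("value1", p.2)]).insert "value2"
        (if d2.contains p.1 then d2.getD p.1 "" else ""))) PySem.Dict.empty
  let attr := d2.items.foldl (fun (attr : PySem.Dict String (PySem.Dict String String)) p =>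
      if attr.contains p.1 then attr
      else attr.insert p.1 (PySem.Dict.mk [("name", p.1), ("value2", p.2), ("value1", "")])) attr
  (PySem.List.sorted attr.values pvSortKey false).map (fun a => a.items)

-- ===== PORT B =====
def pvPresent (v : String) : Bool := v != "" && v != "None"

def pvPush (b : List (List (String × String)) × List (List (String × String)) × List (List (String × String)))
    (s : Nat) (r : List (String × String)) :
    List (List (String × String)) × List (List (String × String)) × List (List (String × String)) :=
  match s with
  | 2 => (b.1 ++ [r], b.2.1, b.2.2)
  | 1 => (b.1, b.2.1 ++ [r], b.2.2)
  | _ => (b.1, b.2.1, b.2.2 ++ [r])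

def pretty_order_entity_attributes_alt (e1 : List (String × List (String × String))) (e2 : List (String × List (String × String))) : List (List (String × String)) :=
  let d1 := PySem.Dict.mk ((PySem.Dict.mk e1).getD "data" [])
  let d2 := PySem.Dict.mk ((PySem.Dict.mk e2).getD "data" [])
  let b := d1.items.foldl (fun b p =>
      pvPush b ((if pvPresent p.2 then 1 else 0) + (if pvPresent (d2.getD p.1 "") then 1 else 0))
        [("name", p.1), ("value1", p.2), ("value2", d2.getD p.1 "")]) ([], [], [])
  let b := d2.items.foldl (fun b p =>
      if d1.contains p.1 then b
      else pvPush b (if pvPresent p.2 then 1 else 0) [("name", p.1), ("value2", p.2), ("value1", "")]) b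
  b.1 ++ b.2.1 ++ b.2.2

-- ===== PRECONDITION & SPEC =====
-- Pre_ excludes inputs without a "data" key (Python raises KeyError) and association lists whose
-- outer or inner key lists contain duplicates: duplicates cannot occur in a real Python dict, so
-- such assoc-list values are ambiguous as dict representations.
def Pre_pretty_order_entity_attributes (e1 : List (String × List (String × String))) (e2 : List (String × List (String × String))) : Prop :=
  (PySem.Dict.mk e1).contains "data" = true ∧ (PySem.Dict.mk e2).contains "data" = true ∧
  (e1.map Prod.fst).Nodup ∧ (e2.map Prod.fst).Nodup ∧
  (((PySem.Dict.mk e1).getD "data" []).map Prod.fst).Nodup ∧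
  (((PySem.Dict.mk e2).getD "data" []).map Prod.fst).Nodup
instance (e1 : List (String × List (String × String))) (e2 : List (String × List (String × String))) : Decidable (Pre_pretty_order_entity_attributes e1 e2) := by unfold Pre_pretty_order_entity_attributes; infer_instance

def pvWitness_pretty_order_entity_attributes : (List (String × List (String × String))) × (List (String × List (String × String))) :=
  ([("data", [("a", "x"), ("b", "")])], [("data", [("b", "y"), ("c", "None")])])

def Spec_pretty_order_entity_attributes (e1 : List (String × List (String × String))) (e2 : List (String × List (String × String))) (out : List (List (String × String))) : Prop := out = pretty_order_entity_attributes_alt e1 e2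
instance (e1 : List (String × List (String × String))) (e2 : List (String × List (String × String))) (out : List (List (String × String))) : Decidable (Spec_pretty_order_entity_attributes e1 e2 out) := by unfold Spec_pretty_order_entity_attributes; infer_instance

-- ===== CLAIM (what is proved, stated in full; the proofs are below) =====
def Claim_equal_pretty_order_entity_attributes : Prop := ∀ (e1 : List (String × List (String × String))) (e2 : List (String × List (String × String))), Dom_pretty_order_entity_attributes e1 e2 → Pre_pretty_order_entity_attributes e1 e2 → Spec_pretty_order_entity_attributes e1 e2 (pretty_order_entity_attributes e1 e2)

-- ===== LEMMAS AND PROOFS =====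

theorem insertBy_append_nb {α : Type} (before : α → α → Bool) (x : α) (l1 l2 : List α)
    (h : ∀ y ∈ l1, before x y = false) :
    PySem.List.insertBy before x (l1 ++ l2) = l1 ++ PySem.List.insertBy before x l2 := by
  induction l1 with
  | nil => simp
  | cons y ys ih =>
    simp only [List.cons_append, PySem.List.insertBy, h y (by simp)]
    simp [ih (fun z hz => h z (by simp [hz]))]

theorem insertBy_all_b {α : Type} (before : α → α → Bool) (x : α) (l : List α)
    (h : ∀ y ∈ l, before x y = true) :
    PySem.List.insertBy before x l = x :: l := by
  cases l with
  | nil => simp [PySem.List.insertBy]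
  | cons y ys => simp [PySem.List.insertBy, h y (by simp)]

theorem sorted_three {α : Type} (xs : List α) (key : α → Int)
    (h : ∀ a, key a = -2 ∨ key a = -1 ∨ key a = 0) :
    PySem.List.sorted xs key false =
      xs.filter (fun a => key a == -2) ++ xs.filter (fun a => key a == -1) ++ xs.filter (fun a => key a == 0) := by
  rw [PySem.List.sorted_eq_foldl_insertBy]
  induction xs using List.reverseRecOn with
  | nil => simp
  | append_singleton xs x ih =>
    rw [List.foldl_append, List.foldl_cons, List.foldl_nil, ih]
    rcases h x with hx | hx | hx
    · rw [List.append_assoc,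
        insertBy_append_nb _ x (xs.filter (fun a => key a == -2))
          (xs.filter (fun a => key a == -1) ++ xs.filter (fun a => key a == 0))
          (by intro y hy; simp at hy; simp [hx, hy.2]),
        insertBy_all_b _ x (xs.filter (fun a => key a == -1) ++ xs.filter (fun a => key a == 0))
          (by intro y hy; simp at hy
              rcases hy with ⟨_, hy⟩ | ⟨_, hy⟩ <;> simp [hx, hy])]
      simp [hx, List.filter_append]
    · rw [List.append_assoc,
        insertBy_append_nb _ x (xs.filter (fun a => key a == -2))
          (xs.filter (fun a => key a == -1) ++ xs.filter (fun a => key a == 0))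
          (by intro y hy; simp at hy; simp [hx, hy.2]),
        insertBy_append_nb _ x (xs.filter (fun a => key a == -1)) (xs.filter (fun a => key a == 0))
          (by intro y hy; simp at hy; simp [hx, hy.2]),
        insertBy_all_b _ x (xs.filter (fun a => key a == 0))
          (by intro y hy; simp at hy; simp [hx, hy.2])]
      simp [hx, List.filter_append]
    · rw [PySem.List.insertBy_of_forall_not_before _ x
          (xs.filter (fun a => key a == -2) ++ xs.filter (fun a => key a == -1) ++ xs.filter (fun a => key a == 0))
          (by intro y hy; simp at hy
              rcases hy with ⟨_, hy⟩ | ⟨_, hy⟩ | ⟨_, hy⟩ <;> simp [hx, hy])]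
      simp [hx, List.filter_append]

theorem foldl_guard {α β : Type} (c : α → Bool) (f : β → α → β) (l : List α) (init : β) :
    l.foldl (fun b x => if c x then b else f b x) init = (l.filter (fun x => !c x)).foldl f init := by
  induction l generalizing init with
  | nil => rfl
  | cons x l ih => by_cases hx : c x <;> simp [hx, ih]

theorem foldl_push {β : Type} (score : β → Nat) (rec : β → List (String × String)) (l : List β)
    (b2 b1 b0 : List (List (String × String))) (hs : ∀ x ∈ l, score x ≤ 2) :
    l.foldl (fun b x => pvPush b (score x) (rec x)) (b2, b1, b0)
    = (b2 ++ (l.filter (fun x => score x == 2)).map rec,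
       b1 ++ (l.filter (fun x => score x == 1)).map rec,
       b0 ++ (l.filter (fun x => score x == 0)).map rec) := by
  induction l generalizing b2 b1 b0 with
  | nil => simp
  | cons x l ih =>
    have h3 : score x = 0 ∨ score x = 1 ∨ score x = 2 := by
      have := hs x (by simp); omega
    have ih' := fun b2 b1 b0 => ih b2 b1 b0 (fun y hy => hs y (by simp [hy]))
    simp only [List.foldl_cons]
    rcases h3 with hx | hx | hx
    · rw [hx, show pvPush (b2, b1, b0) 0 (rec x) = (b2, b1, b0 ++ [rec x]) from rfl, ih']
      simp [hx]
    · rw [hx, show pvPush (b2, b1, b0) 1 (rec x) = (b2, b1 ++ [rec x], b0) from rfl, ih']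
      simp [hx]
    · rw [hx, show pvPush (b2, b1, b0) 2 (rec x) = (b2 ++ [rec x], b1, b0) from rfl, ih']
      simp [hx]

theorem foldl_guard_insert_items {ν : Type} (rec : String × String → ν)
    (l : List (String × String)) (attr : PySem.Dict String ν)
    (hnd : (l.map Prod.fst).Nodup) :
    (l.foldl (fun a p => if a.contains p.1 then a else a.insert p.1 (rec p)) attr).items
    = attr.items ++ (l.filter (fun p => !(attr.contains p.1))).map (fun p => (p.1, rec p)) := by
  induction l generalizing attr with
  | nil => simp
  | cons p l ih =>
    simp only [List.foldl_cons, List.map_cons, List.nodup_cons] at *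
    by_cases hp : attr.contains p.1 = true
    · rw [if_pos hp, ih attr hnd.2, List.filter_cons_of_neg (by simp [hp])]
    · rw [if_neg hp, ih _ hnd.2, PySem.Dict.items_insert_of_not_contains _ _ (by simpa using hp),
        List.filter_cons_of_pos (by simp [hp])]
      have hcong : ∀ q ∈ l, (!(attr.insert p.1 (rec p)).contains q.1) = (!attr.contains q.1) := by
        intro q hq
        rw [PySem.Dict.contains_insert]
        have : q.1 ≠ p.1 := by
          intro he; exact hnd.1 (by rw [← he]; exact List.mem_map_of_mem hq)
        simp [this]
      rw [List.filter_congr hcong]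
      simp

theorem pvSortKey_range (a : PySem.Dict String String) :
    pvSortKey a = -2 ∨ pvSortKey a = -1 ∨ pvSortKey a = 0 := by
  unfold pvSortKey; split_ifs <;> norm_num

theorem recA_items (n v w : String) :
    ((PySem.Dict.mk [("name", n), ("value1", v)]).insert "value2" w).items
      = [("name", n), ("value1", v), ("value2", w)] := by
  rw [PySem.Dict.items_insert_of_not_contains _ _ (by simp)]
  rfl

theorem recA_key (n v w : String) :
    pvSortKey ((PySem.Dict.mk [("name", n), ("value1", v)]).insert "value2" w)
      = -(((if pvPresent v then 1 else 0) + (if pvPresent w then 1 else 0) : Nat) : Int) := by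
  have hv : ((PySem.Dict.mk [("name", n), ("value1", v)]).insert "value2" w).getD "value1" "" = v := by
    rw [PySem.Dict.getD_insert]
    simp [PySem.Dict.getD_eq_get?_getD, PySem.Dict.get?_mk_cons]
  have hw : ((PySem.Dict.mk [("name", n), ("value1", v)]).insert "value2" w).getD "value2" "" = w := by
    rw [PySem.Dict.getD_insert]; simp
  unfold pvSortKey pvPresent
  rw [hv, hw]
  split_ifs <;> simp_all

theorem recB_key (n v : String) :
    pvSortKey (PySem.Dict.mk [("name", n), ("value2", v), ("value1", "")])
      = -(((if pvPresent v then 1 else 0) : Nat) : Int) := by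
  have hv : (PySem.Dict.mk [("name", n), ("value2", v), ("value1", "")]).getD "value1" "" = "" := by
    simp [PySem.Dict.getD_eq_get?_getD, PySem.Dict.get?_mk_cons]
  have hw : (PySem.Dict.mk [("name", n), ("value2", v), ("value1", "")]).getD "value2" "" = v := by
    simp [PySem.Dict.getD_eq_get?_getD, PySem.Dict.get?_mk_cons]
  unfold pvSortKey pvPresent
  rw [hv, hw]
  split_ifs <;> simp_all

def pvRecA (data2 : List (String × String)) (p : String × String) : PySem.Dict String String :=
  (PySem.Dict.mk [("name", p.1), ("value1", p.2)]).insert "value2" ((PySem.Dict.mk data2).getD p.1 "")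

def pvRec2 (p : String × String) : PySem.Dict String String :=
  PySem.Dict.mk [("name", p.1), ("value2", p.2), ("value1", "")]

def pvS1 (data2 : List (String × String)) (p : String × String) : Nat :=
  (if pvPresent p.2 then 1 else 0) + (if pvPresent ((PySem.Dict.mk data2).getD p.1 "") then 1 else 0)

def pvS2 (p : String × String) : Nat := if pvPresent p.2 then 1 else 0

theorem key_recA (data2 : List (String × String)) (p : String × String) :
    pvSortKey (pvRecA data2 p) = -((pvS1 data2 p : Nat) : Int) := recA_key _ _ _

theorem key_rec2 (p : String × String) :
    pvSortKey (pvRec2 p) = -((pvS2 p : Nat) : Int) := recB_key _ _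

theorem items_recA (data2 : List (String × String)) (p : String × String) :
    (pvRecA data2 p).items = [("name", p.1), ("value1", p.2), ("value2", (PySem.Dict.mk data2).getD p.1 "")] :=
  recA_items _ _ _

theorem core (data1 data2 : List (String × String))
    (hnd1 : (data1.map Prod.fst).Nodup) (hnd2 : (data2.map Prod.fst).Nodup) :
    (PySem.List.sorted
      ((data2.foldl (fun (attr : PySem.Dict String (PySem.Dict String String)) p =>
          if attr.contains p.1 then attr
          else attr.insert p.1 (PySem.Dict.mk [("name", p.1), ("value2", p.2), ("value1", "")]))
        (data1.foldl (fun (attr : PySem.Dict String (PySem.Dict String String)) p =>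
          attr.insert p.1 ((PySem.Dict.mk [("name", p.1), ("value1", p.2)]).insert "value2"
            (if (PySem.Dict.mk data2).contains p.1 then (PySem.Dict.mk data2).getD p.1 "" else "")))
          PySem.Dict.empty)).values) pvSortKey false).map (fun a => a.items)
    = ((data2.foldl (fun b p =>
          if (PySem.Dict.mk data1).contains p.1 then b
          else pvPush b (if pvPresent p.2 then 1 else 0) [("name", p.1), ("value2", p.2), ("value1", "")])
        (data1.foldl (fun b p =>
          pvPush b ((if pvPresent p.2 then 1 else 0) + (if pvPresent ((PySem.Dict.mk data2).getD p.1 "") then 1 else 0))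
            [("name", p.1), ("value1", p.2), ("value2", (PySem.Dict.mk data2).getD p.1 "")]) ([], [], []))).1
      ++ (data2.foldl (fun b p =>
          if (PySem.Dict.mk data1).contains p.1 then b
          else pvPush b (if pvPresent p.2 then 1 else 0) [("name", p.1), ("value2", p.2), ("value1", "")])
        (data1.foldl (fun b p =>
          pvPush b ((if pvPresent p.2 then 1 else 0) + (if pvPresent ((PySem.Dict.mk data2).getD p.1 "") then 1 else 0))
            [("name", p.1), ("value1", p.2), ("value2", (PySem.Dict.mk data2).getD p.1 "")]) ([], [], []))).2.1
      ++ (data2.foldl (fun b p =>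
          if (PySem.Dict.mk data1).contains p.1 then b
          else pvPush b (if pvPresent p.2 then 1 else 0) [("name", p.1), ("value2", p.2), ("value1", "")])
        (data1.foldl (fun b p =>
          pvPush b ((if pvPresent p.2 then 1 else 0) + (if pvPresent ((PySem.Dict.mk data2).getD p.1 "") then 1 else 0))
            [("name", p.1), ("value1", p.2), ("value2", (PySem.Dict.mk data2).getD p.1 "")]) ([], [], []))).2.2) := by
  have hv2 : ∀ q : String,
      (if (PySem.Dict.mk data2).contains q then (PySem.Dict.mk data2).getD q "" else "")
        = (PySem.Dict.mk data2).getD q "" := by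
    intro q
    cases hc : (PySem.Dict.mk data2).contains q with
    | true => simp
    | false => simp [PySem.Dict.getD_of_not_contains _ _ hc]
  simp only [hv2]
  simp only [← pvS1.eq_def]
  simp only [← pvS2.eq_def]
  simp only [← pvRecA.eq_def, ← pvRec2.eq_def]
  have hA1 : (data1.foldl (fun (attr : PySem.Dict String (PySem.Dict String String)) p =>
        attr.insert p.1 (pvRecA data2 p)) PySem.Dict.empty).items
      = data1.map (fun p => (p.1, pvRecA data2 p)) := by
    simpa using PySem.Dict.items_foldl_insert_fresh data1 Prod.fst (fun p => pvRecA data2 p)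
      PySem.Dict.empty (fun a _ => by simp) hnd1
  rw [foldl_guard, foldl_push _ _ _ _ _ _ (by intro x _; unfold pvS2; split_ifs <;> omega),
      foldl_push _ _ _ _ _ _ (by intro x _; unfold pvS1; split_ifs <;> omega)]
  simp only [PySem.Dict.values]
  rw [foldl_guard_insert_items _ _ _ hnd2, hA1]
  have hcont : ∀ q ∈ data2,
      (!(data1.foldl (fun (attr : PySem.Dict String (PySem.Dict String String)) p =>
          attr.insert p.1 (pvRecA data2 p)) PySem.Dict.empty).contains q.1)
        = (!(PySem.Dict.mk data1).contains q.1) := by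
    intro q _
    rw [PySem.Dict.contains_eq_decide_mem_keys, PySem.Dict.contains_eq_decide_mem_keys]
    simp only [PySem.Dict.keys, hA1, List.map_map]
    simp
  rw [List.filter_congr hcont]
  simp only [List.map_append, List.map_map]
  rw [sorted_three _ _ pvSortKey_range]
  have e1 : ∀ (x : String × String) (k : Nat),
      (pvSortKey (pvRecA data2 x) == -(k : Int)) = (pvS1 data2 x == k) := by
    intro x k
    rw [key_recA]
    by_cases h : pvS1 data2 x = k
    · rw [h]
      simp
    · have h1 : (pvS1 data2 x == k) = false := by simpa using h
      have h2 : ((-((pvS1 data2 x : Nat) : Int)) == -(k : Int)) = false := by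
        simp only [beq_eq_false_iff_ne, ne_eq, neg_inj, Nat.cast_inj]
        exact h
      rw [h1, h2]
  have e2 : ∀ (x : String × String) (k : Nat),
      (pvSortKey (pvRec2 x) == -(k : Int)) = (pvS2 x == k) := by
    intro x k
    rw [key_rec2]
    by_cases h : pvS2 x = k
    · rw [h]
      simp
    · have h1 : (pvS2 x == k) = false := by simpa using h
      have h2 : ((-((pvS2 x : Nat) : Int)) == -(k : Int)) = false := by
        simp only [beq_eq_false_iff_ne, ne_eq, neg_inj, Nat.cast_inj]
        exact h
      rw [h1, h2]
  have e1a : forall x, (pvSortKey (pvRecA data2 x) == (-2 : Int)) = (pvS1 data2 x == 2) := by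
    intro x
    have h0 : ((-2 : Int)) = -((2 : Nat) : Int) := by norm_num
    rw [h0, e1 x 2]
  have e1b : forall x, (pvSortKey (pvRecA data2 x) == (-1 : Int)) = (pvS1 data2 x == 1) := by
    intro x
    have h0 : ((-1 : Int)) = -((1 : Nat) : Int) := by norm_num
    rw [h0, e1 x 1]
  have e1c : forall x, (pvSortKey (pvRecA data2 x) == (0 : Int)) = (pvS1 data2 x == 0) := by
    intro x
    have h0 : ((0 : Int)) = -((0 : Nat) : Int) := by norm_num
    rw [h0, e1 x 0]
  have e2a : forall x, (pvSortKey (pvRec2 x) == (-2 : Int)) = (pvS2 x == 2) := by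
    intro x
    have h0 : ((-2 : Int)) = -((2 : Nat) : Int) := by norm_num
    rw [h0, e2 x 2]
  have e2b : forall x, (pvSortKey (pvRec2 x) == (-1 : Int)) = (pvS2 x == 1) := by
    intro x
    have h0 : ((-1 : Int)) = -((1 : Nat) : Int) := by norm_num
    rw [h0, e2 x 1]
  have e2c : forall x, (pvSortKey (pvRec2 x) == (0 : Int)) = (pvS2 x == 0) := by
    intro x
    have h0 : ((0 : Int)) = -((0 : Nat) : Int) := by norm_num
    rw [h0, e2 x 0]
  have g2 : forall x : String × String, (pvRec2 x).items = [("name", x.1), ("value2", x.2), ("value1", "")] :=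
    fun _ => rfl
  simp only [List.filter_append, List.map_append, List.filter_map, List.map_map,
    Function.comp_def, List.filter_filter, e1a, e1b, e1c, e2a, e2b, e2c, items_recA, g2]
  simp

-- ===== VERDICT (by name: the statement is the Claim_ definition above) =====
theorem pretty_order_entity_attributes_spec : Claim_equal_pretty_order_entity_attributes := by
  intro e1 e2 _ hpre
  obtain ⟨_, _, _, _, hnd1, hnd2⟩ := hpre
  exact core ((PySem.Dict.mk e1).getD "data" []) ((PySem.Dict.mk e2).getD "data" []) hnd1 hnd2
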